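-- pv_equiv track=rewrite | github.com/Mud-Fire/Codewars | StripComments.py | solution
-- ===== SOURCE A (Python) =====
-- def solution(string, markers):
--     # your code here
--     string = string.split("\n")
--     i = 0
--     while i < len(string):
--         for j in range(len(string[i])):
--
--             if string[i][j] in markers:
--                 string[i] = string[i][0:j]
--                 string[i] = string[i].rstrip()
--                 break
--         i += 1
--     return '\n'.join(string)
-- ===== SOURCE B (Python) =====
-- def solution(string, markers):
--     out = []
--     for line in string.split("\n"):
--         hits = [p for p in (line.find(m) for m in markers if len(m) == 1) if p != -1]
--         out.append(line[:min(hits)].rstrip() if hits else line)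
--     return "\n".join(out)
-- ===== Notes on version B (the rewrite author's own statement) =====
-- stated objective: alternative
-- what changed: Per line, instead of scanning characters left-to-right in Python and testing each char for membership in markers, B runs line.find once per single-character marker and cuts at the minimum hit position (rstrip only when a hit exists).
import Mathlib
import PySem

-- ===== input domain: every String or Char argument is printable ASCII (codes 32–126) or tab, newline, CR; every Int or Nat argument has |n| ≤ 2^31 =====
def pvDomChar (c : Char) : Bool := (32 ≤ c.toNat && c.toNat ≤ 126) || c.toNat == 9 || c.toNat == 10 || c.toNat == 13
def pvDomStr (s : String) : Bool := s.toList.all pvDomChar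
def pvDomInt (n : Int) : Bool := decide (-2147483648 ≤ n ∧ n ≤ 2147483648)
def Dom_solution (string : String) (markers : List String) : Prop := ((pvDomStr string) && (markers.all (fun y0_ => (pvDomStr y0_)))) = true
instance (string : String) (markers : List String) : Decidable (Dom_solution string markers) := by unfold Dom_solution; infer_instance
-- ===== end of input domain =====

-- B replaces A's per-line character scan (first char that is a marker) by a per-marker
-- `line.find` pass whose minimum hit gives the cut point; objective: alternative algorithm.

-- ===== PORT A =====
-- inner `for j in range(len(line)): if line[j] in markers: … break` — scans chars left to
-- right carrying the index j, returns the first j whose char equals some marker, else none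
def solutionScanA (markers : List String) : List Char → Nat → Option Nat
  | [], _ => none
  | c :: rest, j =>
    if markers.contains (String.ofList [c]) then some j else solutionScanA markers rest (j + 1)

-- one iteration of A's while-loop body on line i
def solutionLineA (markers : List String) (line : String) : String :=
  match solutionScanA markers line.toList 0 with
  | none => line
  | some j => PySem.Str.rstrip (PySem.Str.slice line (some 0) (some (j : Int)))

def solution (string : String) (markers : List String) : String :=
  let lines := (PySem.Str.split? string "\n").getD []   -- sep "\n" ≠ "", so split? is some
  PySem.Str.join "\n" (lines.map (fun l => solutionLineA markers l))

-- ===== PORT B =====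
def solutionLineB (markers : List String) (line : String) : String :=
  let hits := ((markers.filter (fun m => PySem.Str.len m == 1)).map
      (fun m => PySem.Str.find line m)).filter (fun p => p != -1)
  match PySem.List.min? hits (fun x => x) with
  | none => line
  | some k => PySem.Str.rstrip (PySem.Str.slice line none (some k))

def solution_alt (string : String) (markers : List String) : String :=
  let lines := (PySem.Str.split? string "\n").getD []
  PySem.Str.join "\n" (lines.map (fun l => solutionLineB markers l))

-- ===== PRECONDITION & SPEC =====
def Spec_solution (string : String) (markers : List String) (out : String) : Prop := out = solution_alt string markers
instance (string : String) (markers : List String) (out : String) : Decidable (Spec_solution string markers out) := by unfold Spec_solution; infer_instance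

-- ===== CLAIM (what is proved, stated in full; the proofs are below) =====
def Claim_equal_solution : Prop := ∀ (string : String) (markers : List String), Dom_solution string markers → Spec_solution string markers (solution string markers)

-- ===== LEMMAS AND PROOFS =====

-- `[d] <+: l` means l starts with d
theorem pv_singleton_prefix (d : Char) (l : List Char) : [d] <+: l ↔ ∃ t, l = d :: t := by
  cases l with
  | nil => simp
  | cons a t => simp [List.cons_prefix_iff]

-- the first occurrence characterizes `find`
theorem pv_find_eq_of (s sub : List Char) (k : Nat) (h1 : sub <+: s.drop k)
    (h2 : ∀ i < k, ¬ sub <+: s.drop i) : PySem.Chars.find s sub = (k : Int) := by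
  have hinf : sub <:+: s := h1.isInfix.trans (s.drop_suffix k).isInfix
  have hnn : 0 ≤ PySem.Chars.find s sub := (PySem.Chars.find_nonneg_iff s sub).mpr hinf
  obtain ⟨hp, hmin⟩ := PySem.Chars.find_spec hnn
  have hk1 : ¬ (k < (PySem.Chars.find s sub).toNat) := fun h => hmin k h h1
  have hk2 : ¬ ((PySem.Chars.find s sub).toNat < k) := fun h => h2 _ h hp
  omega

theorem pv_find_cons_self (c : Char) (rest : List Char) :
    PySem.Chars.find (c :: rest) [c] = 0 := by
  have := pv_find_eq_of (c :: rest) [c] 0 (by simp) (by omega)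
  simpa using this

theorem pv_find_cons_ne (c d : Char) (rest : List Char) (hcd : c ≠ d) :
    PySem.Chars.find (c :: rest) [d] =
      if PySem.Chars.find rest [d] = -1 then -1 else PySem.Chars.find rest [d] + 1 := by
  by_cases h : PySem.Chars.find rest [d] = -1
  · rw [if_pos h]
    rw [PySem.Chars.find_eq_neg_one_iff] at h ⊢
    rw [List.singleton_infix_iff] at h ⊢
    simp [h, Ne.symm hcd]
  · rw [if_neg h]
    have hnn : 0 ≤ PySem.Chars.find rest [d] := by
      have := PySem.Chars.neg_one_le_find rest [d]; omega
    obtain ⟨hp, hmin⟩ := PySem.Chars.find_spec hnn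
    have heq := pv_find_eq_of (c :: rest) [d] ((PySem.Chars.find rest [d]).toNat + 1)
      (by simpa using hp)
      (by
        intro i hi hpre
        cases i with
        | zero =>
          simp only [List.drop_zero] at hpre
          rw [pv_singleton_prefix] at hpre
          obtain ⟨t, ht⟩ := hpre
          injection ht with h1 h2
          exact hcd h1
        | succ i' =>
          have hlt : i' < (PySem.Chars.find rest [d]).toNat := by omega
          exact hmin i' hlt hpre)
    omega

-- shifting the index accumulator of A's scan
theorem pv_scan_succ (markers : List String) (cs : List Char) : ∀ j,
    solutionScanA markers cs (j + 1) = (solutionScanA markers cs j).map (· + 1) := by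
  induction cs with
  | nil => intro j; simp [solutionScanA]
  | cons c rest ih =>
    intro j
    by_cases h : (String.ofList [c]) ∈ markers <;>
      simp [solutionScanA, h, ih, Option.map_map, Function.comp_def]

-- adding 1 to every element shifts the minimum
theorem pv_min?_map_add_one (l : List Int) :
    PySem.List.min? (l.map (· + 1)) (fun x => x) =
      (PySem.List.min? l (fun x => x)).map (· + 1) := by
  cases hl : l with
  | nil =>
    have h := (PySem.List.min?_eq_none_iff ([] : List Int) (fun x => x)).mpr rfl
    simp only [List.map_nil, h, Option.map_none]
  | cons x t =>
    have hne : l ≠ [] := by simp [hl]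
    obtain ⟨m, hm⟩ : ∃ m, PySem.List.min? l (fun x => x) = some m :=
      Option.ne_none_iff_exists'.mp
        (fun h => hne ((PySem.List.min?_eq_none_iff l _).mp h))
    obtain ⟨m', hm'⟩ : ∃ m', PySem.List.min? (l.map (· + 1)) (fun x => x) = some m' :=
      Option.ne_none_iff_exists'.mp
        (fun h => by
          have := (PySem.List.min?_eq_none_iff (l.map (· + 1)) (fun x => x)).mp h
          simp [hl] at this)
    rw [← hl, hm, hm']
    obtain ⟨y, hy, hym⟩ := by simpa using PySem.List.min?_mem hm'
    have h1 : m ≤ y := PySem.List.min?_isMin hm y hy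
    have h2 : m' ≤ m + 1 :=
      PySem.List.min?_isMin hm' (m + 1) (List.mem_map.mpr ⟨m, PySem.List.min?_mem hm, rfl⟩)
    have h3 : m' = m + 1 := by omega
    rw [h3, Option.map_some]

-- when the head char is no marker, every surviving hit is the tail's hit shifted by one
theorem pv_hits_shift (c : Char) (rest : List Char) :
    ∀ (ms : List String), (∀ m ∈ ms, ∃ d, m.toList = [d] ∧ c ≠ d) →
    ((ms.map (fun m => PySem.Chars.find (c :: rest) m.toList)).filter (fun p => p != -1))
      = (((ms.map (fun m => PySem.Chars.find rest m.toList)).filter (fun p => p != -1)).map (· + 1)) := by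
  intro ms
  induction ms with
  | nil => intro _; simp
  | cons m ms ihm =>
    intro hnc
    obtain ⟨d, hd, hcd⟩ := hnc m (by simp)
    have hrec := ihm (fun m' hm' => hnc m' (List.mem_cons_of_mem m hm'))
    simp only [List.map_cons, hd]
    rw [pv_find_cons_ne c d rest hcd]
    by_cases hfd : PySem.Chars.find rest [d] = -1
    · rw [if_pos hfd, List.filter_cons, List.filter_cons]
      simp only [hfd]
      simpa using hrec
    · rw [if_neg hfd, List.filter_cons, List.filter_cons]
      have h1 : (PySem.Chars.find rest [d] + 1 != -1) = true := by
        have := PySem.Chars.neg_one_le_find rest [d]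
        simp only [bne_iff_ne, ne_eq]; omega
      have h2 : (PySem.Chars.find rest [d] != -1) = true := by
        simp only [bne_iff_ne, ne_eq]; exact hfd
      rw [if_pos h1, if_pos h2, List.map_cons, hrec]

-- MAIN: B's minimum-of-finds equals A's first-marker-index scan
theorem pv_main (markers : List String) (cs : List Char) :
    PySem.List.min?
      (((markers.filter (fun m => PySem.Str.len m == 1)).map
          (fun m => PySem.Chars.find cs m.toList)).filter (fun p => p != -1)) (fun x => x)
    = (solutionScanA markers cs 0).map (fun j => (j : Int)) := by
  have hlen : ∀ m ∈ markers.filter (fun m => PySem.Str.len m == 1), ∃ d, m.toList = [d] := by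
    intro m hm
    have := (List.mem_filter.mp hm).2
    simp only [PySem.Str.len_eq, beq_iff_eq] at this
    have hl : m.toList.length = 1 := by exact_mod_cast this
    exact List.length_eq_one_iff.mp hl
  induction cs with
  | nil =>
    have hfe : ((markers.filter (fun m => PySem.Str.len m == 1)).map
        (fun m => PySem.Chars.find ([] : List Char) m.toList)).filter (fun p => p != -1) = [] := by
      rw [List.filter_eq_nil_iff]
      intro p hp
      obtain ⟨m, hm, hpm⟩ := List.mem_map.mp hp
      obtain ⟨d, hd⟩ := hlen m hm
      have hfind : PySem.Chars.find ([] : List Char) m.toList = -1 := by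
        rw [PySem.Chars.find_eq_neg_one_iff, hd, List.singleton_infix_iff]; simp
      simp [← hpm, hfind]
    rw [hfe]
    rw [show (PySem.List.min? ([] : List Int) (fun x => x)) = none from
      (PySem.List.min?_eq_none_iff _ _).mpr rfl]
    simp [solutionScanA]
  | cons c rest ih =>
    by_cases hP : (String.ofList [c]) ∈ markers
    · -- first char is a marker: A returns index 0, B's minimum hit is 0
      have hmem : (String.ofList [c]) ∈ markers.filter (fun m => PySem.Str.len m == 1) := by
        refine List.mem_filter.mpr ⟨hP, ?_⟩
        simp [PySem.Str.len_eq]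
      have h0mem : (0 : Int) ∈ ((markers.filter (fun m => PySem.Str.len m == 1)).map
          (fun m => PySem.Chars.find (c :: rest) m.toList)).filter (fun p => p != -1) := by
        refine List.mem_filter.mpr ⟨List.mem_map.mpr ⟨String.ofList [c], hmem, ?_⟩, by decide⟩
        rw [String.toList_ofList]
        exact pv_find_cons_self c rest
      have hnonneg : ∀ p ∈ ((markers.filter (fun m => PySem.Str.len m == 1)).map
          (fun m => PySem.Chars.find (c :: rest) m.toList)).filter (fun p => p != -1),
          0 ≤ p := by
        intro p hp
        obtain ⟨hp1, hp2⟩ := List.mem_filter.mp hp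
        obtain ⟨m, _, hpm⟩ := List.mem_map.mp hp1
        have := PySem.Chars.neg_one_le_find (c :: rest) m.toList
        simp only [bne_iff_ne, ne_eq] at hp2
        omega
      obtain ⟨m, hm⟩ : ∃ m, PySem.List.min? (((markers.filter (fun m => PySem.Str.len m == 1)).map
          (fun m => PySem.Chars.find (c :: rest) m.toList)).filter (fun p => p != -1))
          (fun x => x) = some m := by
        rcases h : PySem.List.min? (((markers.filter (fun m => PySem.Str.len m == 1)).map
            (fun m => PySem.Chars.find (c :: rest) m.toList)).filter (fun p => p != -1))
            (fun x => x) with _ | m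
        · have := (PySem.List.min?_eq_none_iff _ (fun x : Int => x)).mp h
          rw [this] at h0mem; simp at h0mem
        · exact ⟨m, h⟩
      have hm0 : m = 0 := by
        have h1 : m ≤ 0 := PySem.List.min?_isMin hm 0 h0mem
        have h2 : 0 ≤ m := hnonneg m (PySem.List.min?_mem hm)
        omega
      rw [hm, hm0]
      simp [solutionScanA, hP]
    · -- first char is no marker: every hit shifts by one
      have hnc : ∀ m ∈ markers.filter (fun m => PySem.Str.len m == 1),
          ∃ d, m.toList = [d] ∧ c ≠ d := by
        intro m hm
        obtain ⟨d, hd⟩ := hlen m hm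
        refine ⟨d, hd, ?_⟩
        intro hcd
        subst hcd
        have hmm : String.ofList [c] = m := String.ofList_eq.mpr hd.symm
        exact hP (hmm ▸ (List.mem_filter.mp hm).1)
      rw [pv_hits_shift c rest _ hnc, pv_min?_map_add_one, ih]
      have hsc : solutionScanA markers (c :: rest) 0
          = (solutionScanA markers rest 0).map (· + 1) := by
        have h0 : solutionScanA markers (c :: rest) 0 = solutionScanA markers rest 1 := by
          simp [solutionScanA, hP]
        rw [h0, show (1 : Nat) = 0 + 1 from rfl, pv_scan_succ]
      rw [hsc]
      cases solutionScanA markers rest 0 <;> simp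

theorem pv_line_eq (markers : List String) (line : String) :
    solutionLineA markers line = solutionLineB markers line := by
  unfold solutionLineA solutionLineB
  have hfind : (fun m => PySem.Str.find line m)
      = fun m => PySem.Chars.find line.toList m.toList := by
    funext m; exact PySem.Str.find_eq line m
  simp only [hfind]
  rw [pv_main markers line.toList]
  cases h : solutionScanA markers line.toList 0 with
  | none => simp
  | some j =>
    show PySem.Str.rstrip (PySem.Str.slice line (some 0) (some (j : Int)))
        = PySem.Str.rstrip (PySem.Str.slice line none (some (j : Int)))
    exact congrArg PySem.Str.rstrip (String.toList_inj.mp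
      (by simp only [PySem.Str.toList_slice]; simp [PySem.List.slice]))

theorem solution_eq_alt (string : String) (markers : List String) :
    solution string markers = solution_alt string markers := by
  unfold solution solution_alt
  simp only [pv_line_eq]

-- ===== VERDICT (by name: the statement is the Claim_ definition above) =====
theorem solution_spec : Claim_equal_solution := by
  intro string markers _
  unfold Spec_solution
  exact solution_eq_alt string markers
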